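-- pv_equiv track=rewrite | github.com/EG0RIAN/EGE | 2024/0402/08.py | foo
-- ===== SOURCE A (Python) =====
-- def foo(x, y):
--     if x == 29:
--         return 0
--     if x == y:
--         return 1
--     if x > y:
--         return 0
--     return foo(x + 1, y) + foo(x * 2, y) + foo(x * 3, y)
-- ===== SOURCE B (Python) =====
-- def foo(x, y):
--     # Bottom-up table: g[v] = number of allowed paths from v to y, filled
--     # from y down to x, instead of A's naive ternary recursion.
--     if x == 29:
--         return 0
--     if x >= y:
--         return 1 if x == y else 0
--     g = {y: 0 if y == 29 else 1}
--     for v in range(y - 1, x - 1, -1):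
--         if v == 29:
--             g[v] = 0
--         else:
--             g[v] = g[v + 1] + g.get(2 * v, 0) + g.get(3 * v, 0)
--     return g[x]
-- ===== Notes on version B (the rewrite author's own statement) =====
-- stated objective: faster
-- what changed: Replaces A's naive ternary recursion (recomputing the same subproblems exponentially often) by a bottom-up table g filled from y down to x, where g[v] is the number of allowed paths from v to y.
import Mathlib
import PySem

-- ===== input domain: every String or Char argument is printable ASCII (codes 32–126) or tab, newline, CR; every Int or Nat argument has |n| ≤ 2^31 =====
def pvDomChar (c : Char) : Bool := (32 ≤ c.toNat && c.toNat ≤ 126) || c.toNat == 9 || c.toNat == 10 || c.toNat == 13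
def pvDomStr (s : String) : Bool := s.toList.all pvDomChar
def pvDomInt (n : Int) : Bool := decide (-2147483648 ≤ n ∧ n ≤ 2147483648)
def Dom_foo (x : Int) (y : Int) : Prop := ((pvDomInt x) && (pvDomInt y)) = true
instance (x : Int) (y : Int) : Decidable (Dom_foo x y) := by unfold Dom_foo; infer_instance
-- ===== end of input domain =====

-- B replaces A's exponential triple recursion by a bottom-up O(y-x) table filled from y down to x.

-- ===== PORT A =====
-- A's recursion, with fuel: on every input admitted by Pre_foo the recursion depth is
-- at most (y - x).toNat + 1 (each call strictly increases x when 1 ≤ x), so the fuel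
-- never runs out there and this is A's recursion step for step.
def fooF : Nat → Int → Int → Int
  | 0, _, _ => 0
  | n+1, x, y =>
    if x = 29 then 0
    else if x = y then 1
    else if x > y then 0
    else fooF n (x + 1) y + fooF n (x * 2) y + fooF n (x * 3) y

def foo (x : Int) (y : Int) : Int := fooF ((y - x).toNat + 1) x y

-- ===== PORT B =====
-- loop body of Source B's for-loop
def fooStep (y : Int) (g : PySem.Dict Int Int) (v : Int) : PySem.Dict Int Int :=
  if v = 29 then g.insert v 0
  else g.insert v (g.getD (v + 1) 0 + g.getD (v * 2) 0 + g.getD (v * 3) 0)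

def foo_alt (x : Int) (y : Int) : Int :=
  if x = 29 then 0
  else if x ≥ y then (if x = y then 1 else 0)
  else
    let g0 : PySem.Dict Int Int := (PySem.Dict.empty).insert y (if y = 29 then 0 else 1)
    let g := (PySem.List.pyRange (y - 1) (x - 1) (-1)).foldl (fooStep y) g0
    g.getD x 0   -- g[x]: the key x is always present, the loop runs down to x

-- ===== PRECONDITION & SPEC =====
-- Pre_ excludes exactly the inputs with x ≤ 0 and x < y, on which A's recursion
-- through x*2 never terminates (Python raises RecursionError).
def Pre_foo (x : Int) (y : Int) : Prop := 1 ≤ x ∨ y ≤ x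
instance (x : Int) (y : Int) : Decidable (Pre_foo x y) := by unfold Pre_foo; infer_instance
def pvWitness_foo : Int × Int := (1, 5)

def Spec_foo (x : Int) (y : Int) (out : Int) : Prop := out = foo_alt x y
instance (x : Int) (y : Int) (out : Int) : Decidable (Spec_foo x y out) := by unfold Spec_foo; infer_instance

-- ===== CLAIM (what is proved, stated in full; the proofs are below) =====
def Claim_equal_foo : Prop := ∀ (x : Int) (y : Int), Dom_foo x y → Pre_foo x y → Spec_foo x y (foo x y)

-- ===== LEMMAS AND PROOFS =====

-- fuel irrelevance: any fuel beyond the depth bound gives the same value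
theorem fooF_stable (k : Nat) : ∀ (n m : Nat) (x y : Int), 1 ≤ x → (y - x).toNat ≤ k →
    (y - x).toNat < n → (y - x).toNat < m → fooF n x y = fooF m x y := by
  induction k with
  | zero =>
    intro n m x y hx hk hn hm
    obtain ⟨n', rfl⟩ : ∃ n', n = n' + 1 := ⟨n - 1, by omega⟩
    obtain ⟨m', rfl⟩ : ∃ m', m = m' + 1 := ⟨m - 1, by omega⟩
    simp only [fooF]
    split_ifs <;> first | rfl | omega
  | succ k ih =>
    intro n m x y hx hk hn hm
    obtain ⟨n', rfl⟩ : ∃ n', n = n' + 1 := ⟨n - 1, by omega⟩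
    obtain ⟨m', rfl⟩ : ∃ m', m = m' + 1 := ⟨m - 1, by omega⟩
    simp only [fooF]
    split_ifs with h1 h2 h3
    · rfl
    · rfl
    · rfl
    · have hlt : x < y := by omega
      have e1 := ih n' m' (x + 1) y (by omega) (by omega) (by omega) (by omega)
      have e2 := ih n' m' (x * 2) y (by omega) (by omega) (by omega) (by omega)
      have e3 := ih n' m' (x * 3) y (by omega) (by omega) (by omega) (by omega)
      rw [e1, e2, e3]

theorem foo_eq {x y : Int} (hx : 1 ≤ x) :
    foo x y = if x = 29 then 0 else if x = y then 1 else if x > y then 0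
              else foo (x + 1) y + foo (x * 2) y + foo (x * 3) y := by
  show fooF ((y - x).toNat + 1) x y = _
  simp only [fooF]
  split_ifs with h1 h2 h3
  · rfl
  · rfl
  · rfl
  · have hlt : x < y := by omega
    unfold foo
    have e1 := fooF_stable (y - x).toNat ((y - x).toNat) ((y - (x + 1)).toNat + 1)
      (x + 1) y (by omega) (by omega) (by omega) (by omega)
    have e2 := fooF_stable (y - x).toNat ((y - x).toNat) ((y - x * 2).toNat + 1)
      (x * 2) y (by omega) (by omega) (by omega) (by omega)
    have e3 := fooF_stable (y - x).toNat ((y - x).toNat) ((y - x * 3).toNat + 1)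
      (x * 3) y (by omega) (by omega) (by omega) (by omega)
    rw [e1, e2, e3]

theorem foo_of_gt {x y : Int} (h : y < x) : foo x y = 0 := by
  show fooF _ x y = 0
  obtain ⟨n', hn⟩ : ∃ n', (y - x).toNat + 1 = n' + 1 := ⟨(y - x).toNat, rfl⟩
  rw [hn]; simp only [fooF]; split_ifs <;> first | rfl | omega

theorem foo_self (x : Int) : foo x x = if x = 29 then 0 else 1 := by
  show fooF _ x x = _
  simp only [fooF]
  split_ifs <;> first | rfl | omega

theorem foo_29 (y : Int) : foo 29 y = 0 := by
  show fooF _ 29 y = 0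
  simp [fooF]

-- loop invariant: after the loop has processed y-1, …, v, the table holds foo j y on [v, y]
def FooInv (x y v : Int) (g : PySem.Dict Int Int) : Prop :=
  ∀ j : Int, g.getD j 0 = if v ≤ j ∧ j ≤ y then foo j y else 0

theorem inv_step {x y v : Int} {g : PySem.Dict Int Int}
    (hx : 1 ≤ x) (hxv : x ≤ v) (hvy : v < y) (h : FooInv x y (v + 1) g) :
    FooInv x y v (fooStep y g v) := by
  intro j
  have hv1 : 1 ≤ v := by omega
  have h2 : g.getD (v * 2) 0 = foo (v * 2) y := by
    rw [h (v * 2)]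
    split_ifs with hc
    · rfl
    · rw [foo_of_gt (by omega)]
  have h3 : g.getD (v * 3) 0 = foo (v * 3) y := by
    rw [h (v * 3)]
    split_ifs with hc
    · rfl
    · rw [foo_of_gt (by omega)]
  have h1 : g.getD (v + 1) 0 = foo (v + 1) y := by
    rw [h (v + 1)]
    split_ifs with hc
    · rfl
    · omega
  unfold fooStep
  by_cases hv29 : v = 29
  · simp only [if_pos hv29]
    rw [PySem.Dict.getD_insert]
    by_cases hj : j = v
    · subst hj
      rw [if_pos rfl, if_pos ⟨le_refl _, by omega⟩, hv29, foo_29]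
    · rw [if_neg hj, h j]
      have : (v + 1 ≤ j ∧ j ≤ y) ↔ (v ≤ j ∧ j ≤ y) := by omega
      rw [if_congr this rfl rfl]
  · simp only [if_neg hv29]
    rw [PySem.Dict.getD_insert]
    by_cases hj : j = v
    · subst hj
      rw [if_pos rfl, if_pos ⟨le_refl _, by omega⟩, h1, h2, h3]
      rw [foo_eq hv1, if_neg hv29, if_neg (by omega : ¬ j = y), if_neg (by omega : ¬ j > y)]
    · rw [if_neg hj, h j]
      have : (v + 1 ≤ j ∧ j ≤ y) ↔ (v ≤ j ∧ j ≤ y) := by omega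
      rw [if_congr this rfl rfl]

theorem inv_fold (x y : Int) (hx : 1 ≤ x) :
    ∀ (n : Nat) (v : Int) (g : PySem.Dict Int Int), (v - x).toNat = n → x ≤ v → v ≤ y →
      FooInv x y v g →
      FooInv x y x ((PySem.List.pyRange (v - 1) (x - 1) (-1)).foldl (fooStep y) g) := by
  intro n
  induction n with
  | zero =>
    intro v g hn hxv hvy hInv
    have : v = x := by omega
    subst this
    rw [PySem.List.pyRange_neg_one_eq_nil (by omega)]
    simpa using hInv
  | succ n ih =>
    intro v g hn hxv hvy hInv
    have hxv' : x < v := by omega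
    rw [PySem.List.pyRange_neg_one_cons (by omega : x - 1 < v - 1)]
    simp only [List.foldl_cons]
    have hstep : FooInv x y (v - 1) (fooStep y g (v - 1)) := by
      have := inv_step (x := x) (y := y) (v := v - 1) (g := g) hx (by omega) (by omega)
      rw [show v - 1 + 1 = v by ring] at this
      exact this hInv
    exact ih (v - 1) _ (by omega) (by omega) (by omega) hstep

-- ===== VERDICT (by name: the statement is the Claim_ definition above) =====
theorem foo_spec : Claim_equal_foo := by
  intro x y _ hpre
  show foo x y = foo_alt x y
  unfold foo_alt
  by_cases h1 : x = 29
  · rw [if_pos h1, h1, foo_29]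
  rw [if_neg h1]
  by_cases h2 : x ≥ y
  · rw [if_pos h2]
    by_cases h3 : x = y
    · rw [if_pos h3, h3, foo_self, if_neg (h3 ▸ h1)]
    · rw [if_neg h3, foo_of_gt (by omega)]
  · rw [if_neg h2]
    show foo x y = ((PySem.List.pyRange (y - 1) (x - 1) (-1)).foldl (fooStep y)
        ((PySem.Dict.empty).insert y (if y = 29 then 0 else 1))).getD x 0
    have hlt : x < y := by omega
    have hx : 1 ≤ x := by rcases hpre with h | h <;> omega
    have hInv0 : FooInv x y y ((PySem.Dict.empty).insert y (if y = 29 then 0 else 1)) := by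
      intro j
      rw [PySem.Dict.getD_insert]
      by_cases hj : j = y
      · rw [if_pos hj, hj, if_pos (show y ≤ y ∧ y ≤ y from ⟨le_refl y, le_refl y⟩), foo_self]
      · rw [if_neg hj, if_neg (by omega : ¬ (y ≤ j ∧ j ≤ y)), PySem.Dict.getD_empty]
    have hfin := inv_fold x y hx (y - x).toNat y _ rfl (by omega) (le_refl _) hInv0
    have hfx := hfin x
    rw [if_pos (show x ≤ x ∧ x ≤ y from ⟨le_refl x, le_of_lt hlt⟩)] at hfx
    exact hfx.symm
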